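-- pv_equiv track=rewrite | github.com/RakeemRanger/bls-data-semantic-kernel | utils/helpers.py | identify_series_from_keywords
-- ===== SOURCE A (Python) =====
-- from typing import Any, Dict, List, Optional, Tuple
--
-- def identify_series_from_keywords(text: str) -> List[str]:
--     """Identify BLS series IDs from keywords in text.
--
--     Args:
--         text: Input text
--
--     Returns:
--         List of series IDs
--     """
--     text_lower = text.lower()
--     series_ids = []
--
--     # Keyword to series ID mapping
--     mappings = {
--         "unemployment rate": "LNS14000000",
--         "unemployment": "LNS14000000",
--         "jobless": "LNS14000000",
--         "cpi": "CUUR0000SA0",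
--         "consumer price": "CUUR0000SA0",
--         "inflation": "CUUR0000SA0",
--         "employment": "CES0000000001",
--         "jobs": "CES0000000001",
--         "nonfarm": "CES0000000001",
--         "labor force participation": "LNS12300000",
--         "participation rate": "LNS12300000",
--         "wages": "CES0500000003",
--         "earnings": "CES0500000003",
--         "hourly earnings": "CES0500000003"
--     }
--
--     for keyword, series_id in mappings.items():
--         if keyword in text_lower and series_id not in series_ids:
--             series_ids.append(series_id)
--
--     return series_ids
-- ===== SOURCE B (Python) =====
-- from typing import Any, Dict, List, Optional, Tuple
--
-- # Inverted mapping: series ID -> its keywords, in first-seen order of the original dict.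
-- _SERIES_KEYWORDS = [
--     ("LNS14000000", ["unemployment rate", "unemployment", "jobless"]),
--     ("CUUR0000SA0", ["cpi", "consumer price", "inflation"]),
--     ("CES0000000001", ["employment", "jobs", "nonfarm"]),
--     ("LNS12300000", ["labor force participation", "participation rate"]),
--     ("CES0500000003", ["wages", "earnings", "hourly earnings"]),
-- ]
--
--
-- def identify_series_from_keywords(text: str) -> List[str]:
--     """Identify BLS series IDs from keywords in text."""
--     text_lower = text.lower()
--     return [series_id
--             for series_id, keywords in _SERIES_KEYWORDS
--             if any(kw in text_lower for kw in keywords)]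
-- ===== Notes on version B (the rewrite author's own statement) =====
-- stated objective: simpler
-- what changed: B inverts the keyword->id dict into an id->keywords grouping and emits each id once via an any() test in a comprehension, eliminating A's per-keyword dedup membership scan of the result list.
import Mathlib
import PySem

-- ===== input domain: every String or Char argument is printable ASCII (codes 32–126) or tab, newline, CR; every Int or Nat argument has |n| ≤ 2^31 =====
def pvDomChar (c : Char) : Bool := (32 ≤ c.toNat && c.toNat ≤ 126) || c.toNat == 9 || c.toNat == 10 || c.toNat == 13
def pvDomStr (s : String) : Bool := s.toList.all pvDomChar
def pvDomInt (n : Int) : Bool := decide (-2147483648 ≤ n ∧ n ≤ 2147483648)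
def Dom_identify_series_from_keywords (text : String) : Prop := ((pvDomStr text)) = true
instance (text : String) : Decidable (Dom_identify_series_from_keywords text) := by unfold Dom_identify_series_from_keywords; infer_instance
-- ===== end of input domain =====

-- B inverts the keyword->id mapping into id->keywords groups and emits each id once via an
-- any-keyword test, removing A's dedup membership scan of the result list (objective: simpler).


-- ===== PORT A =====
-- the dict literal `mappings`, as an association list in insertion order
def aMappings : List (String × String) :=
  [("unemployment rate", "LNS14000000"),
   ("unemployment", "LNS14000000"),
   ("jobless", "LNS14000000"),
   ("cpi", "CUUR0000SA0"),
   ("consumer price", "CUUR0000SA0"),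
   ("inflation", "CUUR0000SA0"),
   ("employment", "CES0000000001"),
   ("jobs", "CES0000000001"),
   ("nonfarm", "CES0000000001"),
   ("labor force participation", "LNS12300000"),
   ("participation rate", "LNS12300000"),
   ("wages", "CES0500000003"),
   ("earnings", "CES0500000003"),
   ("hourly earnings", "CES0500000003")]

-- one iteration of A's loop body
def aStep (text_lower : String) (series_ids : List String) (p : String × String) : List String :=
  if PySem.Str.isIn p.1 text_lower && !(series_ids.contains p.2)
  then series_ids ++ [p.2] else series_ids

def identify_series_from_keywords (text : String) : List String :=
  let text_lower := PySem.Str.lower text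
  aMappings.foldl (aStep text_lower) []

-- ===== PORT B =====
-- inverted mapping: series ID -> its keywords, first-seen order
def bGroups : List (String × List String) :=
  [("LNS14000000", ["unemployment rate", "unemployment", "jobless"]),
   ("CUUR0000SA0", ["cpi", "consumer price", "inflation"]),
   ("CES0000000001", ["employment", "jobs", "nonfarm"]),
   ("LNS12300000", ["labor force participation", "participation rate"]),
   ("CES0500000003", ["wages", "earnings", "hourly earnings"])]

def identify_series_from_keywords_alt (text : String) : List String :=
  let text_lower := PySem.Str.lower text
  (bGroups.filter (fun g => g.2.any (fun kw => PySem.Str.isIn kw text_lower))).map (fun g => g.1)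

-- ===== PRECONDITION & SPEC =====
def Spec_identify_series_from_keywords (text : String) (out : List String) : Prop := out = identify_series_from_keywords_alt text
instance (text : String) (out : List String) : Decidable (Spec_identify_series_from_keywords text out) := by unfold Spec_identify_series_from_keywords; infer_instance

-- ===== CLAIM (what is proved, stated in full; the proofs are below) =====
def Claim_equal_identify_series_from_keywords : Prop := ∀ (text : String), Dom_identify_series_from_keywords text → Spec_identify_series_from_keywords text (identify_series_from_keywords text)

-- ===== LEMMAS AND PROOFS =====

-- once an id is in the accumulator, A's loop over that id's keywords changes nothing
theorem foldA_skip (tl : String) (id : String) (kws : List String) (acc : List String)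
    (h : acc.contains id = true) :
    (kws.map (fun kw => (kw, id))).foldl (aStep tl) acc = acc := by
  induction kws generalizing acc with
  | nil => rfl
  | cons k ks ih =>
    simp only [List.map_cons, List.foldl_cons, aStep]
    rw [h, Bool.not_true, Bool.and_false, if_neg (by simp)]
    exact ih acc h

-- A's loop over one id's (contiguous) keyword block appends the id iff any keyword matches
theorem foldA_group (tl : String) (id : String) (kws : List String) (acc : List String)
    (h : acc.contains id = false) :
    (kws.map (fun kw => (kw, id))).foldl (aStep tl) acc =
      if kws.any (fun kw => PySem.Str.isIn kw tl) then acc ++ [id] else acc := by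
  induction kws generalizing acc with
  | nil => rfl
  | cons k ks ih =>
    simp only [List.map_cons, List.foldl_cons, aStep, List.any_cons]
    rcases Bool.eq_false_or_eq_true (PySem.Str.isIn k tl) with hk | hk
    · simp only [hk, h, Bool.not_false, Bool.and_self, Bool.true_or, reduceIte]
      exact foldA_skip tl id ks (acc ++ [id]) (by simp)
    · simp only [hk, Bool.false_and, Bool.false_or]
      exact ih acc h

-- A's fold over contiguous groups with pairwise-distinct ids equals B's filter-map
theorem foldA_groups (tl : String) (groups : List (String × List String)) (acc : List String)
    (h : ∀ p ∈ groups, acc.contains p.1 = false)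
    (hp : groups.Pairwise (fun a b => a.1 ≠ b.1)) :
    (groups.flatMap (fun g => g.2.map (fun kw => (kw, g.1)))).foldl (aStep tl) acc =
      acc ++ (groups.filter (fun g => g.2.any (fun kw => PySem.Str.isIn kw tl))).map (fun g => g.1) := by
  induction groups generalizing acc with
  | nil => simp
  | cons g gs ih =>
    rw [List.flatMap_cons, List.foldl_append,
        foldA_group tl g.1 g.2 acc (h g (by simp))]
    rcases List.pairwise_cons.mp hp with ⟨hne, hp'⟩
    rcases Bool.eq_false_or_eq_true (g.2.any (fun kw => PySem.Str.isIn kw tl)) with hg | hg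
    · have h' : ∀ p ∈ gs, (acc ++ [g.1]).contains p.1 = false := by
        intro p hpmem
        have h1 := h p (List.mem_cons_of_mem _ hpmem)
        have h2 : g.1 ≠ p.1 := hne p hpmem
        simp only [List.contains_eq_mem, decide_eq_false_iff_not, List.mem_append,
          List.mem_singleton] at h1 ⊢
        exact fun hc => hc.elim h1 (fun he => h2 he.symm)
      rw [if_pos hg, ih (acc ++ [g.1]) h' hp']
      simp only [List.filter_cons]
      rw [if_pos hg, List.map_cons, List.append_assoc, List.singleton_append]
    · have hg' : ¬ ((g.2.any fun kw => PySem.Str.isIn kw tl) = true) :=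
        fun hc => Bool.false_ne_true (hg.symm.trans hc)
      rw [if_neg hg', ih acc (fun p hm => h p (List.mem_cons_of_mem _ hm)) hp']
      simp only [List.filter_cons]
      rw [if_neg hg']

-- ===== VERDICT (by name: the statement is the Claim_ definition above) =====
theorem identify_series_from_keywords_spec : Claim_equal_identify_series_from_keywords := by
  intro text _
  unfold Spec_identify_series_from_keywords identify_series_from_keywords identify_series_from_keywords_alt
  have hflat : aMappings = bGroups.flatMap (fun g => g.2.map (fun kw => (kw, g.1))) := by
    rfl
  rw [hflat, foldA_groups (PySem.Str.lower text) bGroups [] (by intro p _; rfl) (by decide)]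
  rfl
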